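-- pv_equiv track=rewrite | github.com/lex-ikoon/qq | python3.7libs/wf_network_ui_parse_tab.py | tab_vex_indent
-- ===== SOURCE A (Python) =====
-- def tab_vex_indent (snippet, leading_spaces) :
--     indented = ""
--     lines    = snippet.split('\n')
--
--     for (i, line) in enumerate(lines) :
--         if i > 0 :
--             line = " " * leading_spaces + line
--
--         indented = indented + line + '\n'
--
--     return indented
-- ===== SOURCE B (Python) =====
-- def tab_vex_indent(snippet, leading_spaces):
--     if '\n' in snippet:
--         snippet = snippet.replace('\n', '\n' + ' ' * leading_spaces)
--     return snippet + '\n'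
-- ===== Notes on version B (the rewrite author's own statement) =====
-- stated objective: idiomatic
-- what changed: Replaces the split/enumerate/accumulator loop with a single string substitution: every '\n' becomes '\n' plus the indent, and one trailing '\n' is appended.
import Mathlib
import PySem

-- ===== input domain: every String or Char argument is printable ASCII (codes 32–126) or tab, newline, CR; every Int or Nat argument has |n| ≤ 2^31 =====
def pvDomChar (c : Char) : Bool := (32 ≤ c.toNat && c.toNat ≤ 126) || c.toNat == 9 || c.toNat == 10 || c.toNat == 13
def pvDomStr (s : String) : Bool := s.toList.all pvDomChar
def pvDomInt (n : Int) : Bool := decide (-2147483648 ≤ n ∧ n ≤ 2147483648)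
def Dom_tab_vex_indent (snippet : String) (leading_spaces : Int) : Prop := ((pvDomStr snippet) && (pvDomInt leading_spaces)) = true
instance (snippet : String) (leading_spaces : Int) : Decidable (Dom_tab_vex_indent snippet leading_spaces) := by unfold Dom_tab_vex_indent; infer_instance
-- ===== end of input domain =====

-- B replaces A's split/enumerate/accumulate loop by a single substitution:
-- each '\n' becomes '\n' + indent, plus one trailing '\n' (idiomatic, same cost).


-- ===== PORT A =====
def tab_vex_indent (snippet : String) (leading_spaces : Int) : String :=
  String.ofList
    ((PySem.List.enumerate (PySem.Chars.splitOn snippet.toList ['\n'])).foldl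
      (fun acc p =>
        acc ++ (if p.1 > 0 then List.replicate leading_spaces.toNat ' ' ++ p.2 else p.2) ++ ['\n'])
      ([] : List Char))

-- ===== PORT B =====
def tab_vex_indent_alt (snippet : String) (leading_spaces : Int) : String :=
  String.ofList
    ((if PySem.Chars.isIn ['\n'] snippet.toList then
        PySem.Chars.replace snippet.toList ['\n']
          ('\n' :: List.replicate leading_spaces.toNat ' ')
      else snippet.toList) ++ ['\n'])

-- ===== PRECONDITION & SPEC =====
def Spec_tab_vex_indent (snippet : String) (leading_spaces : Int) (out : String) : Prop := out = tab_vex_indent_alt snippet leading_spaces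
instance (snippet : String) (leading_spaces : Int) (out : String) : Decidable (Spec_tab_vex_indent snippet leading_spaces out) := by unfold Spec_tab_vex_indent; infer_instance

-- ===== CLAIM (what is proved, stated in full; the proofs are below) =====
def Claim_equal_tab_vex_indent : Prop := ∀ (snippet : String) (leading_spaces : Int), Dom_tab_vex_indent snippet leading_spaces → Spec_tab_vex_indent snippet leading_spaces (tab_vex_indent snippet leading_spaces)

-- ===== LEMMAS AND PROOFS =====

/-- What B computes on the character list: indent inserted after every newline. -/
def padF (pad : List Char) : List Char → List Char
  | [] => []
  | c :: t => if c = '\n' then '\n' :: (pad ++ padF pad t) else c :: padF pad t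

/-- First line / remaining lines of a newline split. -/
def sp : List Char → List Char × List (List Char)
  | [] => ([], [])
  | c :: t => if c = '\n' then ([], (sp t).1 :: (sp t).2) else (c :: (sp t).1, (sp t).2)

theorem replace_go_eq (pad : List Char) :
    ∀ (fuel : Nat) (l acc : List Char), l.length ≤ fuel →
      PySem.Chars.replace.go ['\n'] ('\n' :: pad) fuel l acc = acc.reverse ++ padF pad l := by
  intro fuel
  induction fuel with
  | zero =>
    intro l acc h
    have : l = [] := List.eq_nil_of_length_eq_zero (Nat.le_zero.mp h)
    subst this
    simp [PySem.Chars.replace.go, padF]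
  | succ n ih =>
    intro l acc h
    cases l with
    | nil => simp [PySem.Chars.replace.go, padF]
    | cons c t =>
      by_cases hc : c = '\n'
      · subst hc
        have hpre : List.isPrefixOf ['\n'] ('\n' :: t) = true := by
          simp [List.isPrefixOf]
        simp only [PySem.Chars.replace.go, hpre, if_pos]
        rw [show List.drop ['\n'].length ('\n' :: t) = t from rfl, ih t _ (by simpa using h)]
        simp [padF]
      · have hpre : List.isPrefixOf ['\n'] (c :: t) = false := by
          simp [List.isPrefixOf]; exact Ne.symm hc
        simp only [PySem.Chars.replace.go, hpre]
        rw [if_neg (by simp), ih t _ (by simpa using h)]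
        simp [padF, hc]

theorem splitOn_go_eq :
    ∀ (fuel : Nat) (l cur : List Char) (acc : List (List Char)), l.length ≤ fuel →
      PySem.Chars.splitOn.go ['\n'] fuel l cur acc
        = acc.reverse ++ (cur.reverse ++ (sp l).1) :: (sp l).2 := by
  intro fuel
  induction fuel with
  | zero =>
    intro l cur acc h
    have : l = [] := List.eq_nil_of_length_eq_zero (Nat.le_zero.mp h)
    subst this
    simp [PySem.Chars.splitOn.go, sp]
  | succ n ih =>
    intro l cur acc h
    cases l with
    | nil => simp [PySem.Chars.splitOn.go, sp]
    | cons c t =>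
      by_cases hc : c = '\n'
      · subst hc
        have hpre : List.isPrefixOf ['\n'] ('\n' :: t) = true := by
          simp [List.isPrefixOf]
        simp only [PySem.Chars.splitOn.go, hpre, if_pos]
        rw [show List.drop ['\n'].length ('\n' :: t) = t from rfl, ih t [] _ (by simpa using h)]
        simp [sp]
      · have hpre : List.isPrefixOf ['\n'] (c :: t) = false := by
          simp [List.isPrefixOf]; exact Ne.symm hc
        simp only [PySem.Chars.splitOn.go, hpre]
        rw [if_neg (by simp), ih t (c :: cur) acc (by simpa using h)]
        simp [sp, hc]

theorem fold_enum_pos (pad : List Char) :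
    ∀ (lines : List (List Char)) (start : Int) (acc : List Char), 1 ≤ start →
      (PySem.List.enumerate lines start).foldl
          (fun a p => a ++ (if p.1 > 0 then pad ++ p.2 else p.2) ++ ['\n']) acc
        = acc ++ lines.flatMap (fun line => pad ++ line ++ ['\n']) := by
  intro lines
  induction lines with
  | nil => intro start acc _; simp [PySem.List.enumerate]
  | cons l t ih =>
    intro start acc hs
    rw [PySem.List.enumerate_cons]
    simp only [List.foldl_cons]
    rw [ih (start + 1) _ (by omega)]
    have : start > 0 := by omega
    simp [this]

theorem sp_padF (pad : List Char) :
    ∀ l : List Char,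
      (sp l).1 ++ '\n' :: (sp l).2.flatMap (fun line => pad ++ line ++ ['\n'])
        = padF pad l ++ ['\n'] := by
  intro l
  induction l with
  | nil => simp [sp, padF]
  | cons c t ih =>
    by_cases hc : c = '\n'
    · subst hc
      simp only [sp, padF, if_pos]
      simp only [List.nil_append, List.cons_append, List.append_assoc]
      rw [← ih]
      simp
    · simp only [sp, padF, if_neg hc]
      rw [List.cons_append, ih]
      simp

theorem padF_no_newline (pad : List Char) :
    ∀ l : List Char, '\n' ∉ l → padF pad l = l := by
  intro l
  induction l with
  | nil => intro _; rfl
  | cons c t ih =>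
    intro h
    have hc : ¬ c = '\n' := fun e => h (e ▸ List.mem_cons_self ..)
    simp only [padF, if_neg hc]
    rw [ih (fun m => h (List.mem_cons_of_mem _ m))]

theorem a_eq_b (snippet : String) (leading_spaces : Int) :
    tab_vex_indent snippet leading_spaces = tab_vex_indent_alt snippet leading_spaces := by
  unfold tab_vex_indent tab_vex_indent_alt
  set pad := List.replicate leading_spaces.toNat ' ' with hpad
  set l := snippet.toList with hl
  have hsplit : PySem.Chars.splitOn l ['\n'] = (sp l).1 :: (sp l).2 := by
    unfold PySem.Chars.splitOn
    rw [splitOn_go_eq (l.length + 1) l [] [] (by omega)]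
    simp
  have hrep : PySem.Chars.replace l ['\n'] ('\n' :: pad) = padF pad l := by
    unfold PySem.Chars.replace
    rw [if_neg (by simp)]
    rw [replace_go_eq pad l.length l [] (le_refl _)]
    simp
  have halt : (if PySem.Chars.isIn ['\n'] l then
      PySem.Chars.replace l ['\n'] ('\n' :: pad) else l) = padF pad l := by
    by_cases hin : PySem.Chars.isIn ['\n'] l = true
    · rw [if_pos hin, hrep]
    · rw [if_neg hin, padF_no_newline pad l]
      intro hm
      exact hin ((PySem.Chars.isIn_iff_infix ['\n'] l).mpr
        ((List.singleton_infix_iff _ _).mpr hm))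
  rw [hsplit, halt]
  congr 1
  rw [PySem.List.enumerate_cons]
  simp only [List.foldl_cons]
  rw [show (0 : Int) + 1 = 1 from rfl,
    fold_enum_pos pad (sp l).2 1 _ (le_refl _)]
  have h0 : ¬ ((0 : Int) > 0) := by omega
  simp only [h0, if_false, List.nil_append]
  rw [← sp_padF pad l]
  simp

-- ===== VERDICT (by name: the statement is the Claim_ definition above) =====
theorem tab_vex_indent_spec : Claim_equal_tab_vex_indent := by
  intro snippet leading_spaces _
  unfold Spec_tab_vex_indent
  exact a_eq_b snippet leading_spaces
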